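-- pv_equiv track=rewrite | github.com/blthree/DNAencoding | decode.py | b3_to_dna
-- ===== SOURCE A (Python) =====
-- def b3_to_dna(str_to_encode, prev_char=None):
--     dna_map = {'A': {'0': 'C', '1': 'G', '2': 'T'},
--                'C': {'0': 'G', '1': 'T', '2': 'A'},
--                'G': {'0': 'T', '1': 'A', '2': 'C'},
--                'T': {'0': 'A', '1': 'C', '2': 'G'}}
--     dna_out = ""
--     for i in range(len(str_to_encode)):
--         if not prev_char:
--             prev_char = 'A'
--         cur_char = dna_map[prev_char][str_to_encode[i]]
--         dna_out += cur_char
--         prev_char = cur_char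
--
--     return dna_out
-- ===== SOURCE B (Python) =====
-- def _prefixes(vals):
--     # Divide and conquer: prefix sums mod 4 of the two halves compose by
--     # shifting the right half's prefixes by the left half's last prefix.
--     if len(vals) <= 1:
--         return vals[:]
--     mid = len(vals) // 2
--     left = _prefixes(vals[:mid])
--     right = _prefixes(vals[mid:])
--     t = left[-1]
--     return left + [(t + x) % 4 for x in right]
--
--
-- def b3_to_dna(str_to_encode, prev_char=None):
--     if not str_to_encode:
--         return ""
--     base = {'A': 0, 'C': 1, 'G': 2, 'T': 3}
--     start = base[prev_char] if prev_char else 0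
--     dval = {'0': 1, '1': 2, '2': 3}
--     vals = [dval[d] for d in str_to_encode]
--     return ''.join('ACGT'[(start + p) % 4] for p in _prefixes(vals))
-- ===== Notes on version B (the rewrite author's own statement) =====
-- stated objective: alternative
-- what changed: Replaces the rolling nested-dict state machine with a divide-and-conquer construction: digit values are turned into prefix sums mod 4 by recursively solving the two halves and shifting the right half by the left half's last prefix, then mapped through 'ACGT'.
import Mathlib
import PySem

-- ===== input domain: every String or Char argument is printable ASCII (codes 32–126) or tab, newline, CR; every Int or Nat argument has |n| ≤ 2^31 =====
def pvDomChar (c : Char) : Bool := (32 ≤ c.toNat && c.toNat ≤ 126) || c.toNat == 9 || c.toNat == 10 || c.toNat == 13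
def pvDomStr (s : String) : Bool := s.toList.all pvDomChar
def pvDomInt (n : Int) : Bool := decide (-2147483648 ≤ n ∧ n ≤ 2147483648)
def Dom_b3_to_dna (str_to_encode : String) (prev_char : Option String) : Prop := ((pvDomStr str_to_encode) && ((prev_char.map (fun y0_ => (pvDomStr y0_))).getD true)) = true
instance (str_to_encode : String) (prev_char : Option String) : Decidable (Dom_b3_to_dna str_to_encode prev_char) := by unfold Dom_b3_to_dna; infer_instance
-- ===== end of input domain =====

-- B replaces A's rolling nested-dict state machine by a divide-and-conquer construction of
-- the prefix sums mod 4 of the digit values, mapped through 'ACGT' (objective: alternative).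

-- ===== PORT A =====
-- Python strings are represented as List Char; the nested dict literal is a PySem.Dict
-- keyed by the one-character strings ([Char]) / characters it holds.
def aDnaMap : PySem.Dict (List Char) (PySem.Dict Char Char) :=
  PySem.Dict.ofList
  [(['A'], PySem.Dict.ofList [('0','C'),('1','G'),('2','T')]),
   (['C'], PySem.Dict.ofList [('0','G'),('1','T'),('2','A')]),
   (['G'], PySem.Dict.ofList [('0','T'),('1','A'),('2','C')]),
   (['T'], PySem.Dict.ofList [('0','A'),('1','C'),('2','G')])]

-- one iteration of A's loop body (state = (dna_out, prev_char)); the getD defaults are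
-- unreachable under Pre_, where every key is present
def aStep (st : List Char × List Char) (c : Char) : List Char × List Char :=
  let prev := if st.2 = [] then ['A'] else st.2
  let cur : Char := (aDnaMap.getD prev PySem.Dict.empty).getD c ' '
  (st.1 ++ [cur], [cur])

def b3_to_dna (str_to_encode : String) (prev_char : Option String) : String :=
  let cs := str_to_encode.toList
  let init : List Char := match prev_char with | none => [] | some p => p.toList
  -- for i in range(len(str_to_encode)): … str_to_encode[i] … (always in range here)
  let st := (PySem.List.pyRange 0 (cs.length : Int) 1).foldl
    (fun st (i : Int) => aStep st (PySem.List.pyGetD cs i ' ')) ([], init)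
  String.ofList st.1

-- ===== PORT B =====
def bDval : PySem.Dict Char Int := PySem.Dict.ofList [('0',1),('1',2),('2',3)]

-- _prefixes: divide and conquer; prefix sums mod 4 of the two halves compose by
-- shifting the right half by the left half's last prefix. (Python writes the base
-- case as 'len(vals) <= 1'; 'left[-1]' is getLastD, left is nonempty there.)
def bPrefixes (vals : List Int) : List Int :=
  if vals.length ≤ 1 then vals
  else
    let mid := vals.length / 2
    let left := bPrefixes (vals.take mid)
    let right := bPrefixes (vals.drop mid)
    let t := left.getLastD 0
    left ++ right.map (fun x => PySem.Int.mod (t + x) 4)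
termination_by vals.length
decreasing_by
  · simp only [List.length_take]; omega
  · simp only [List.length_drop]; omega

def b3_to_dna_alt (str_to_encode : String) (prev_char : Option String) : String :=
  let cs := str_to_encode.toList
  if cs = [] then "" else
  let base : PySem.Dict (List Char) Int := PySem.Dict.ofList [(['A'],0),(['C'],1),(['G'],2),(['T'],3)]
  -- start = base[prev_char] if prev_char else 0 (key always present under Pre_)
  let start : Int := match prev_char with
    | none => 0
    | some p => if p.toList = [] then 0 else base.getD p.toList 0
  let vals : List Int := cs.map (fun d => bDval.getD d 0)
  String.ofList ((bPrefixes vals).map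
    (fun p => PySem.List.pyGetD ("ACGT".toList) (PySem.Int.mod (start + p) 4) ' '))

-- ===== PRECONDITION & SPEC =====
-- Pre_ excludes exactly the inputs on which A raises KeyError: a character of str_to_encode
-- outside '0'/'1'/'2', or (when the string is non-empty, so the loop runs) a non-falsy
-- prev_char other than 'A','C','G','T'.
def Pre_b3_to_dna (str_to_encode : String) (prev_char : Option String) : Prop :=
  (str_to_encode.toList.all (fun c => c == '0' || c == '1' || c == '2') = true) ∧
  (str_to_encode.toList = [] ∨ (prev_char.getD "").toList = [] ∨ (prev_char.getD "").toList = ['A'] ∨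
   (prev_char.getD "").toList = ['C'] ∨ (prev_char.getD "").toList = ['G'] ∨
   (prev_char.getD "").toList = ['T'])
instance (str_to_encode : String) (prev_char : Option String) : Decidable (Pre_b3_to_dna str_to_encode prev_char) := by unfold Pre_b3_to_dna; infer_instance

def pvWitness_b3_to_dna : String × Option String := ("0120", some "T")

def Spec_b3_to_dna (str_to_encode : String) (prev_char : Option String) (out : String) : Prop := out = b3_to_dna_alt str_to_encode prev_char
instance (str_to_encode : String) (prev_char : Option String) (out : String) : Decidable (Spec_b3_to_dna str_to_encode prev_char out) := by unfold Spec_b3_to_dna; infer_instance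

-- ===== CLAIM (what is proved, stated in full; the proofs are below) =====
def Claim_equal_b3_to_dna : Prop := ∀ (str_to_encode : String) (prev_char : Option String), Dom_b3_to_dna str_to_encode prev_char → Pre_b3_to_dna str_to_encode prev_char → Spec_b3_to_dna str_to_encode prev_char (b3_to_dna str_to_encode prev_char)

-- ===== LEMMAS AND PROOFS =====

-- letter with code v (0..3)
def pvLetter (v : Int) : Char := PySem.List.pyGetD ("ACGT".toList) v ' '

-- the sequence of prefix sums mod 4 starting from v (the pure meaning of both programs)
def pvPref (v : Int) : List Int → List Int
  | [] => []
  | x :: xs => let w := PySem.Int.mod (v + x) 4; w :: pvPref w xs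

lemma pv_mod4 (a : Int) : PySem.Int.mod a 4 = a % 4 :=
  PySem.Int.mod_eq_emod_of_pos (by norm_num)

lemma pvPref_shift (xs : List Int) (v : Int) :
    pvPref v xs = (pvPref 0 xs).map (fun p => PySem.Int.mod (v + p) 4) := by
  induction xs generalizing v with
  | nil => simp [pvPref]
  | cons x xs ih =>
    simp only [pvPref, List.map_cons]
    refine List.cons_eq_cons.mpr ⟨by simp only [pv_mod4]; omega, ?_⟩
    rw [ih (PySem.Int.mod (v + x) 4), ih (PySem.Int.mod (0 + x) 4), List.map_map]
    apply List.map_congr_left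
    intro p _
    simp only [Function.comp, pv_mod4]; omega

lemma pvPref_append (l r : List Int) (v : Int) :
    pvPref v (l ++ r) = pvPref v l ++ pvPref ((pvPref v l).getLastD v) r := by
  induction l generalizing v with
  | nil => simp [pvPref]
  | cons x xs ih =>
    simp only [List.cons_append, pvPref, List.cons_append, ih]
    have : (PySem.Int.mod (v + x) 4 :: pvPref (PySem.Int.mod (v + x) 4) xs).getLastD v
        = (pvPref (PySem.Int.mod (v + x) 4) xs).getLastD (PySem.Int.mod (v + x) 4) := by
      cases h : pvPref (PySem.Int.mod (v + x) 4) xs <;> simp [List.getLastD]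
    rw [this]

lemma bPrefixes_eq (vals : List Int) (h : ∀ x ∈ vals, 0 ≤ x ∧ x < 4) :
    bPrefixes vals = pvPref 0 vals := by
  induction vals using bPrefixes.induct with
  | case1 vals hle =>
    rw [bPrefixes]
    simp only [hle, if_true]
    match vals, hle with
    | [], _ => simp [pvPref]
    | [x], _ =>
      have hx := h x (by simp)
      simp only [pvPref, pv_mod4]
      have : (0 + x) % 4 = x := by omega
      rw [this]
  | case2 vals hle mid ihL ihR =>
    rw [bPrefixes]
    simp only [hle, if_false]
    have hLmem : ∀ x ∈ vals.take (vals.length / 2), 0 ≤ x ∧ x < 4 :=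
      fun x hx => h x (List.mem_of_mem_take hx)
    have hRmem : ∀ x ∈ vals.drop (vals.length / 2), 0 ≤ x ∧ x < 4 :=
      fun x hx => h x (List.mem_of_mem_drop hx)
    rw [ihL hLmem, ihR hRmem]
    conv_rhs => rw [← List.take_append_drop (vals.length / 2) vals]
    rw [pvPref_append,
      pvPref_shift (vals.drop (vals.length / 2)) ((pvPref 0 (vals.take (vals.length / 2))).getLastD 0)]

-- A's codes equal the prefix sums of the digit values
def pvCodes (v : Int) : List Char → List Int
  | [] => []
  | c :: cs => let w := PySem.Int.mod (v + bDval.getD c 0) 4; w :: pvCodes w cs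

lemma pvCodes_eq_pref (v : Int) (cs : List Char) :
    pvCodes v cs = pvPref v (cs.map (fun c => bDval.getD c 0)) := by
  induction cs generalizing v with
  | nil => rfl
  | cons c cs ih => simp [pvCodes, pvPref, ih]

lemma pvCodes_mem4 (v : Int) (hv : v = 0 ∨ v = 1 ∨ v = 2 ∨ v = 3) (c : Char)
    (hc : c = '0' ∨ c = '1' ∨ c = '2') :
    PySem.Int.mod (v + bDval.getD c 0) 4 = 0 ∨ PySem.Int.mod (v + bDval.getD c 0) 4 = 1 ∨
    PySem.Int.mod (v + bDval.getD c 0) 4 = 2 ∨ PySem.Int.mod (v + bDval.getD c 0) 4 = 3 := by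
  rcases hv with rfl | rfl | rfl | rfl <;> rcases hc with rfl | rfl | rfl <;> decide

lemma foldA_eq (cs : List Char) (hcs : ∀ c ∈ cs, c = '0' ∨ c = '1' ∨ c = '2')
    (v : Int) (hv : v = 0 ∨ v = 1 ∨ v = 2 ∨ v = 3) (accA : List Char) (s2 : List Char)
    (hs2 : s2 = [pvLetter v] ∨ (s2 = [] ∧ v = 0)) :
    (cs.foldl aStep (accA, s2)).1 = accA ++ (pvCodes v cs).map pvLetter := by
  induction cs generalizing v accA s2 with
  | nil => simp [pvCodes]
  | cons c cs ih =>
    have hc := hcs c (by simp)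
    have hrest : ∀ x ∈ cs, x = '0' ∨ x = '1' ∨ x = '2' := fun x hx => hcs x (by simp [hx])
    have hprev : (if s2 = [] then ['A'] else s2) = [pvLetter v] := by
      rcases hs2 with rfl | ⟨rfl, rfl⟩
      · rcases hv with rfl | rfl | rfl | rfl <;> decide
      · decide
    have hcur : (aDnaMap.getD [pvLetter v] PySem.Dict.empty).getD c ' '
        = pvLetter (PySem.Int.mod (v + bDval.getD c 0) 4) := by
      rcases hv with rfl | rfl | rfl | rfl <;> rcases hc with rfl | rfl | rfl <;> decide
    simp only [List.foldl_cons, aStep, hprev, hcur, pvCodes]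
    rw [ih hrest _ (pvCodes_mem4 v hv c hc) _ _ (Or.inl rfl)]
    simp [List.append_assoc]

-- B's output letters, rewritten as the shifted prefixes mapped through pvLetter
lemma bMap_eq (vals : List Int) (v : Int) :
    (pvPref 0 vals).map (fun p => PySem.List.pyGetD ("ACGT".toList) (PySem.Int.mod (v + p) 4) ' ')
      = (pvPref v vals).map pvLetter := by
  rw [pvPref_shift vals v, List.map_map]
  rfl

-- ===== VERDICT (by name: the statement is the Claim_ definition above) =====
theorem b3_to_dna_spec : Claim_equal_b3_to_dna := by
  intro s pc _ hpre
  obtain ⟨hdigb, hpc⟩ := hpre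
  have hdig : ∀ c ∈ s.toList, c = '0' ∨ c = '1' ∨ c = '2' := by
    intro c hc; have := (List.all_eq_true.mp hdigb) c hc; simp only [Bool.or_eq_true, beq_iff_eq] at this; tauto
  show b3_to_dna s pc = b3_to_dna_alt s pc
  have hvals : ∀ x ∈ s.toList.map (fun d => bDval.getD d 0), 0 ≤ x ∧ x < 4 := by
    intro x hx
    obtain ⟨c, hc, rfl⟩ := List.mem_map.mp hx
    rcases hdig c hc with rfl | rfl | rfl <;> decide
  have gen : ∀ (init : List Char) (v : Int), v = 0 ∨ v = 1 ∨ v = 2 ∨ v = 3 →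
      (init = [pvLetter v] ∨ (init = [] ∧ v = 0)) →
      String.ofList ((List.foldl (fun st i => aStep st (PySem.List.pyGetD s.toList i ' '))
          (([] : List Char), init) (PySem.List.pyRange 0 (s.toList.length : Int) 1)).1)
        = String.ofList ((bPrefixes (s.toList.map (fun d => bDval.getD d 0))).map
            (fun p => PySem.List.pyGetD ("ACGT".toList) (PySem.Int.mod (v + p) 4) ' ')) := by
    intro init v hv hinit
    rw [PySem.List.foldl_pyRange_zero_pyGetD' s.toList ' ' aStep ([], init)]
    rw [foldA_eq s.toList hdig v hv [] init hinit]
    rw [bPrefixes_eq _ hvals, bMap_eq, pvCodes_eq_pref]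
    simp
  unfold b3_to_dna b3_to_dna_alt
  by_cases hs : s.toList = []
  · simp [hs, PySem.List.pyRange_one_eq_nil]
  · simp only [hs, if_false]
    replace hpc : (pc.getD "").toList = [] ∨ (pc.getD "").toList = ['A'] ∨
        (pc.getD "").toList = ['C'] ∨ (pc.getD "").toList = ['G'] ∨
        (pc.getD "").toList = ['T'] := by tauto
    rcases pc with _ | p
    · exact gen _ _ (by decide) (Or.inr ⟨rfl, rfl⟩)
    · simp only [Option.getD] at hpc
      rcases hpc with h | h | h | h | h <;> dsimp only <;> rw [h] <;>
        exact gen _ _ (by decide) (by decide)
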